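-- pv_equiv track=rewrite | github.com/mrbartrns/algorithm-and-structure | programmers/lv4_review/p4.py | solution
-- ===== SOURCE A (Python) =====
-- INF = 987654321
--
-- def solution(strs, t):
--     dp = [INF] * (len(t) + 1)
--     dp[0] = 0
--     for i in range(1, len(dp)):
--         for j in range(1, 6):
--             idx = i - j if i - j > 0 else 0
--             if t[idx:i] in strs:
--                 dp[i] = min(dp[i], dp[i - j] + 1)
--     return dp[len(t)] if dp[len(t)] < INF else -1
-- ===== SOURCE B (Python) =====
-- INF = 987654321
--
-- def solution(strs, t):
--     # Forward relaxation: push dp[p] + 1 along every usable word starting at p,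
--     # iterating over the deduplicated set of words of length 1..5 (the only
--     # lengths that can ever match) and skipping still-unreachable positions.
--     n = len(t)
--     words = {w for w in strs if 1 <= len(w) <= 5}
--     dp = [INF] * (n + 1)
--     dp[0] = 0
--     for p in range(n):
--         d = dp[p]
--         if d == INF:
--             continue
--         for w in words:
--             if t[p:p + len(w)] == w:
--                 q = p + len(w)
--                 if dp[q] > d + 1:
--                     dp[q] = d + 1
--     return dp[n] if dp[n] < INF else -1
-- ===== Notes on version B (the rewrite author's own statement) =====
-- stated objective: alternative
-- what changed: Replaces A's backward pull-DP (for each position i, try piece lengths 1..5 with Python negative-index reads of dp) by a forward relaxation DP: iterate positions left to right, skip unreachable ones, and for each word of the deduplicated length-1..5 word set push dp[p]+1 to p+len(w).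
import Mathlib
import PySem

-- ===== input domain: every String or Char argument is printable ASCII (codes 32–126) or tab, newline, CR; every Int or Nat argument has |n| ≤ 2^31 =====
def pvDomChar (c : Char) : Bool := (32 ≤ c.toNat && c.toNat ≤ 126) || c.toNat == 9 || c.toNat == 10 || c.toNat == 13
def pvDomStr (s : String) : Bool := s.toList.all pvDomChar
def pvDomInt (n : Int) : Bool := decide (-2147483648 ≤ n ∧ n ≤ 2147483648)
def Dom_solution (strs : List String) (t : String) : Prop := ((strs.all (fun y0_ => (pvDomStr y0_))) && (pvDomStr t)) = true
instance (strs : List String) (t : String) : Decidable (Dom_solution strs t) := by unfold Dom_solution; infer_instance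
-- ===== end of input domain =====

-- B replaces A's backward pull-DP over piece lengths 1..5 (with Python negative-index
-- reads) by a forward relaxation DP over the deduplicated set of usable words
-- (objective: alternative; same asymptotic cost).

-- ===== PORT A =====
-- inner loop body of A: 'for j in range(1, 6): idx = ...; if t[idx:i] in strs: dp[i] = min(...)'
def Abody (strs : List String) (t : String) (i : Int) (dp : List Int) (j : Int) : List Int :=
  let idx := if i - j > 0 then i - j else 0
  if PySem.Str.slice t (some idx) (some i) ∈ strs then
    PySem.List.pySetD dp i (min (PySem.List.pyGetD dp i 0) (PySem.List.pyGetD dp (i - j) 0 + 1))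
  else dp

-- outer loop body of A: one iteration of 'for i in range(1, len(dp))'
def AbodyOuter (strs : List String) (t : String) (dp : List Int) (i : Int) : List Int :=
  (PySem.List.pyRange 1 6 1).foldl (Abody strs t i) dp

def solution (strs : List String) (t : String) : Int :=
  let dp0 := PySem.List.pyRepeat [(987654321 : Int)] (PySem.Str.len t + 1)
  let dp1 := PySem.List.pySetD dp0 0 0
  let dp2 := (PySem.List.pyRange 1 (dp1.length : Int) 1).foldl (AbodyOuter strs t) dp1
  if PySem.List.pyGetD dp2 (PySem.Str.len t) 0 < 987654321 then
    PySem.List.pyGetD dp2 (PySem.Str.len t) 0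
  else -1

-- ===== PORT B =====
-- B's word set: {w for w in strs if 1 <= len(w) <= 5}
def Bwords (strs : List String) : List String :=
  PySem.Set.ofList (strs.filter (fun w => decide (1 ≤ PySem.Str.len w) && decide (PySem.Str.len w ≤ 5)))

-- inner loop body of B: 'for w in words: if t[p:p+len(w)] == w: ... relax dp[q]'
def Bbody (t : String) (d : Int) (p : Int) (dp : List Int) (w : String) : List Int :=
  if PySem.Str.slice t (some p) (some (p + PySem.Str.len w)) = w then
    if PySem.List.pyGetD dp (p + PySem.Str.len w) 0 > d + 1 then
      PySem.List.pySetD dp (p + PySem.Str.len w) (d + 1)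
    else dp
  else dp

-- outer loop body of B: one iteration of 'for p in range(n)' (with the 'continue')
def BbodyOuter (strs : List String) (t : String) (dp : List Int) (p : Int) : List Int :=
  let d := PySem.List.pyGetD dp p 0
  if d = 987654321 then dp
  else (Bwords strs).foldl (Bbody t d p) dp

def solution_alt (strs : List String) (t : String) : Int :=
  let n := PySem.Str.len t
  let dp0 := PySem.List.pyRepeat [(987654321 : Int)] (n + 1)
  let dp1 := PySem.List.pySetD dp0 0 0
  let dp2 := (PySem.List.pyRange 0 n 1).foldl (BbodyOuter strs t) dp1
  if PySem.List.pyGetD dp2 n 0 < 987654321 then PySem.List.pyGetD dp2 n 0 else -1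

-- ===== PRECONDITION & SPEC =====
-- Pre_ excludes exactly the inputs where Python A raises IndexError: dp[i-j] is read with a
-- negative index that underflows the list when len(t) ≤ 2 and the tested prefix is in strs.
def Pre_solution (strs : List String) (t : String) : Prop :=
  ¬ ((PySem.Str.len t = 1 ∧ t ∈ strs) ∨
     (PySem.Str.len t = 2 ∧ PySem.Str.slice t (some 0) (some 1) ∈ strs))

instance (strs : List String) (t : String) : Decidable (Pre_solution strs t) := by
  unfold Pre_solution; infer_instance

def pvWitness_solution : List String × String := (["ab", "b"], "aab")

def Spec_solution (strs : List String) (t : String) (out : Int) : Prop := out = solution_alt strs t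
instance (strs : List String) (t : String) (out : Int) : Decidable (Spec_solution strs t out) := by
  unfold Spec_solution; infer_instance

-- ===== CLAIM (what is proved, stated in full; the proofs are below) =====
def Claim_equal_solution : Prop := ∀ (strs : List String) (t : String),
  Dom_solution strs t → Pre_solution strs t → Spec_solution strs t (solution strs t)

-- ===== LEMMAS AND PROOFS =====

/-! ### the common specification: the pull recurrence table `mtab` / its entries `Mv` -/

def piece (t : String) (a b : Nat) : String :=
  PySem.Str.slice t (some (a : Int)) (some (b : Int))

def mstep (strs : List String) (t : String) (prev : List Int) (i : Nat) : Int :=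
  ([1, 2, 3, 4, 5] : List Nat).foldl
    (fun acc j => if j ≤ i ∧ piece t (i - j) i ∈ strs then min acc (prev.getD (i - j) 0 + 1) else acc)
    987654321

def mtab (strs : List String) (t : String) : Nat → List Int
  | 0 => [0]
  | i + 1 => mtab strs t i ++ [mstep strs t (mtab strs t i) (i + 1)]

def Mv (strs : List String) (t : String) (i : Nat) : Int := (mtab strs t i).getD i 0

def mvstep (strs : List String) (t : String) (k : Nat) (acc : Int) (j : Nat) : Int :=
  if j ≤ k + 1 ∧ piece t (k + 1 - j) (k + 1) ∈ strs then min acc (Mv strs t (k + 1 - j) + 1) else acc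

/-! ### generic min-fold lemmas -/

theorem foldMin_le_init {α : Type} (l : List α) (c : α → Prop) [DecidablePred c] (g : α → Int)
    (a : Int) : l.foldl (fun acc x => if c x then min acc (g x) else acc) a ≤ a := by
  induction l generalizing a with
  | nil => simp
  | cons y ys ih =>
    simp only [List.foldl_cons]
    refine le_trans (ih _) ?_
    split_ifs
    · exact min_le_left _ _
    · exact le_refl _

theorem foldMin_le_cand {α : Type} (l : List α) (c : α → Prop) [DecidablePred c] (g : α → Int)
    (a : Int) {x : α} (hx : x ∈ l) (hc : c x) :
    l.foldl (fun acc x => if c x then min acc (g x) else acc) a ≤ g x := by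
  induction l generalizing a with
  | nil => cases hx
  | cons y ys ih =>
    simp only [List.foldl_cons]
    rcases List.mem_cons.mp hx with rfl | hmem
    · refine le_trans (foldMin_le_init ys c g _) ?_
      rw [if_pos hc]
      exact min_le_right _ _
    · exact ih _ hmem

theorem foldMin_cases {α : Type} (l : List α) (c : α → Prop) [DecidablePred c] (g : α → Int)
    (a : Int) : l.foldl (fun acc x => if c x then min acc (g x) else acc) a = a ∨
      ∃ x ∈ l, c x ∧ l.foldl (fun acc x => if c x then min acc (g x) else acc) a = g x := by
  induction l generalizing a with
  | nil => exact Or.inl rfl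
  | cons y ys ih =>
    simp only [List.foldl_cons]
    rcases ih (if c y then min a (g y) else a) with h | ⟨x, hx, hcx, h⟩
    · rw [h]
      by_cases hcy : c y
      · rw [if_pos hcy]
        rcases min_choice a (g y) with hm | hm
        · exact Or.inl hm
        · exact Or.inr ⟨y, List.mem_cons_self, hcy, hm⟩
      · rw [if_neg hcy]; exact Or.inl rfl
    · exact Or.inr ⟨x, List.mem_cons_of_mem _ hx, hcx, h⟩

/-! ### basic facts about mtab / Mv -/

theorem mtab_length (strs : List String) (t : String) (k : Nat) :
    (mtab strs t k).length = k + 1 := by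
  induction k with
  | zero => rfl
  | succ k ih => simp [mtab, ih]

theorem mtab_getD (strs : List String) (t : String) {p k : Nat} (hp : p ≤ k) :
    (mtab strs t k).getD p 0 = Mv strs t p := by
  induction k with
  | zero => interval_cases p; rfl
  | succ k ih =>
    rcases Nat.lt_or_ge p (k + 1) with h | h
    · show (mtab strs t k ++ [_]).getD p 0 = _
      rw [List.getD_append _ _ _ p (by rw [mtab_length]; omega)]
      exact ih (by omega)
    · have : p = k + 1 := by omega
      subst this
      rfl

theorem Mv_succ_mstep (strs : List String) (t : String) (k : Nat) :
    Mv strs t (k + 1) = mstep strs t (mtab strs t k) (k + 1) := by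
  show (mtab strs t k ++ [_]).getD (k + 1) 0 = _
  rw [List.getD_eq_getElem?_getD, show k + 1 = (mtab strs t k).length from (mtab_length strs t k).symm,
      List.getElem?_concat_length]
  rfl

theorem mem15 {j : Nat} (h1 : 1 ≤ j) (h5 : j ≤ 5) : j ∈ ([1, 2, 3, 4, 5] : List Nat) := by
  interval_cases j <;> simp

theorem of_mem15 {j : Nat} (hj : j ∈ ([1, 2, 3, 4, 5] : List Nat)) : 1 ≤ j ∧ j ≤ 5 := by
  simp only [List.mem_cons, List.not_mem_nil, or_false] at hj
  omega

theorem Mv_succ (strs : List String) (t : String) (k : Nat) :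
    Mv strs t (k + 1) = ([1, 2, 3, 4, 5] : List Nat).foldl (mvstep strs t k) 987654321 := by
  rw [Mv_succ_mstep]
  unfold mstep mvstep
  apply PySem.List.foldl_congr_mem
  intro acc j hj
  obtain ⟨h1, -⟩ := of_mem15 hj
  by_cases hc : j ≤ k + 1 ∧ piece t (k + 1 - j) (k + 1) ∈ strs
  · rw [if_pos hc, if_pos hc, mtab_getD strs t (by omega)]
  · rw [if_neg hc, if_neg hc]

theorem Mv_zero (strs : List String) (t : String) : Mv strs t 0 = 0 := rfl

theorem Mv_le_INF (strs : List String) (t : String) (i : Nat) : Mv strs t i ≤ 987654321 := by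
  cases i with
  | zero => rw [Mv_zero]; omega
  | succ k =>
    rw [Mv_succ]
    unfold mvstep
    exact foldMin_le_init _ _ _ _

theorem Mv_nonneg (strs : List String) (t : String) (i : Nat) : 0 ≤ Mv strs t i := by
  induction i using Nat.strong_induction_on with
  | _ i ih =>
    match i with
    | 0 => rw [Mv_zero]
    | k + 1 =>
      rw [Mv_succ]
      unfold mvstep
      rcases foldMin_cases ([1, 2, 3, 4, 5] : List Nat)
          (fun j => j ≤ k + 1 ∧ piece t (k + 1 - j) (k + 1) ∈ strs)
          (fun j => Mv strs t (k + 1 - j) + 1) 987654321 with h | ⟨j, hj, _, h⟩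
      · rw [h]; omega
      · rw [h]
        have := ih (k + 1 - j) (by obtain ⟨h1, -⟩ := of_mem15 hj; omega)
        omega

/-! ### the edge relation and its interaction with Mv -/

def EdgeP (strs : List String) (t : String) (p q : Nat) : Prop :=
  p < q ∧ q ≤ p + 5 ∧ q ≤ t.toList.length ∧ piece t p q ∈ strs

theorem edge_E1 (strs : List String) (t : String) {p q : Nat} (h : EdgeP strs t p q) :
    Mv strs t q ≤ Mv strs t p + 1 := by
  obtain ⟨hpq, h5, -, hmem⟩ := h
  obtain ⟨i, rfl⟩ : ∃ i, q = i + 1 := ⟨q - 1, by omega⟩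
  rw [Mv_succ]
  unfold mvstep
  have hj : (i + 1) - p ∈ ([1, 2, 3, 4, 5] : List Nat) := mem15 (by omega) (by omega)
  have hc : (i + 1) - p ≤ i + 1 ∧ piece t (i + 1 - ((i + 1) - p)) (i + 1) ∈ strs := by
    constructor
    · omega
    · rw [show i + 1 - ((i + 1) - p) = p by omega]; exact hmem
  have := foldMin_le_cand ([1, 2, 3, 4, 5] : List Nat)
      (fun j => j ≤ i + 1 ∧ piece t (i + 1 - j) (i + 1) ∈ strs)
      (fun j => Mv strs t (i + 1 - j) + 1) 987654321 hj hc
  have h2 : (fun j => Mv strs t (i + 1 - j) + 1) ((i + 1) - p) = Mv strs t p + 1 := by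
    show Mv strs t (i + 1 - ((i + 1) - p)) + 1 = Mv strs t p + 1
    rw [show i + 1 - ((i + 1) - p) = p by omega]
  exact le_of_le_of_eq this h2

theorem edge_E2 (strs : List String) (t : String) {q : Nat} (h1 : 1 ≤ q)
    (hq : q ≤ t.toList.length) :
    Mv strs t q = 987654321 ∨ ∃ p, EdgeP strs t p q ∧ Mv strs t q = Mv strs t p + 1 := by
  obtain ⟨i, rfl⟩ : ∃ i, q = i + 1 := ⟨q - 1, by omega⟩
  rw [Mv_succ]
  unfold mvstep
  rcases foldMin_cases ([1, 2, 3, 4, 5] : List Nat)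
      (fun j => j ≤ i + 1 ∧ piece t (i + 1 - j) (i + 1) ∈ strs)
      (fun j => Mv strs t (i + 1 - j) + 1) 987654321 with h | ⟨j, hj, ⟨hji, hpc⟩, h⟩
  · exact Or.inl h
  · obtain ⟨hj1, hj5⟩ := of_mem15 hj
    exact Or.inr ⟨i + 1 - j, ⟨by omega, by omega, hq, hpc⟩, h⟩

theorem toList_piece (t : String) (a b : Nat) :
    (piece t a b).toList = (t.toList.drop a).take (b - a) := by
  unfold piece
  rw [PySem.Str.toList_slice, PySem.Chars.slice_eq_listSlice, PySem.List.slice_natCast]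

/-! ### A-side: one outer iteration turns row k into row k+1 -/

def arow (strs : List String) (t : String) (n k : Nat) (a : Int) : List Int :=
  mtab strs t k ++ a :: List.replicate (n - (k + 1)) 987654321

def astep (strs : List String) (t : String) (n k : Nat) (a : Int) (j : Int) : Int :=
  if PySem.Str.slice t
      (some (if ((k : Int) + 1) - j > 0 then ((k : Int) + 1) - j else 0))
      (some ((k : Int) + 1)) ∈ strs then
    min (PySem.List.pyGetD (arow strs t n k a) ((k : Int) + 1) 0)
        (PySem.List.pyGetD (arow strs t n k a) (((k : Int) + 1) - j) 0 + 1)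
  else a

theorem arow_getD_self (strs : List String) (t : String) (n k : Nat) (a : Int) :
    PySem.List.pyGetD (arow strs t n k a) ((k : Int) + 1) 0 = a := by
  rw [show ((k : Int) + 1) = ((k + 1 : Nat) : Int) by push_cast; ring, PySem.List.pyGetD_natCast]
  unfold arow
  rw [List.getD_eq_getElem?_getD, show k + 1 = (mtab strs t k).length from (mtab_length strs t k).symm]
  rw [List.getElem?_append_right (le_refl _)]
  simp [mtab_length]

theorem arow_getD_lt (strs : List String) (t : String) (n k : Nat) (a : Int) {m : Nat}
    (hm : m ≤ k) : PySem.List.pyGetD (arow strs t n k a) ((m : Nat) : Int) 0 = Mv strs t m := by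
  rw [PySem.List.pyGetD_natCast]
  unfold arow
  rw [List.getD_append _ _ _ m (by rw [mtab_length]; omega)]
  exact mtab_getD strs t hm

theorem getD0_nonneg (l : List Int) (h : ∀ x ∈ l, 0 ≤ x) (m : Nat) : 0 ≤ l.getD m 0 := by
  by_cases hm : m < l.length
  · rw [List.getD_eq_getElem l 0 hm]
    exact h _ (List.getElem_mem hm)
  · rw [List.getD_eq_getElem?_getD, List.getElem?_eq_none (by omega)]
    exact le_refl 0

theorem pyGetD_nonneg (dp : List Int) (i : Int) (h : ∀ x ∈ dp, 0 ≤ x) :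
    0 ≤ PySem.List.pyGetD dp i 0 := by
  by_cases hr : PySem.Raise.InRange dp.length i
  · exact h _ (PySem.List.pyGetD_mem dp 0 hr)
  · rw [PySem.List.pyGetD_of_none dp i 0 ((PySem.List.pyGet?_eq_none_iff dp i).mpr hr)]

theorem mstep_nonneg (strs : List String) (t : String) (prev : List Int) (i : Nat)
    (hprev : ∀ x ∈ prev, 0 ≤ x) : 0 ≤ mstep strs t prev i := by
  unfold mstep
  rcases foldMin_cases ([1, 2, 3, 4, 5] : List Nat)
      (fun j => j ≤ i ∧ piece t (i - j) i ∈ strs)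
      (fun j => prev.getD (i - j) 0 + 1) 987654321 with h | ⟨j, hj, _, h⟩
  · rw [h]; omega
  · rw [h]
    have := getD0_nonneg prev hprev (i - j)
    omega

theorem mtab_nonneg (strs : List String) (t : String) (k : Nat) :
    ∀ x ∈ mtab strs t k, 0 ≤ x := by
  induction k with
  | zero => intro x hx; simp [mtab] at hx; omega
  | succ k ih =>
    intro x hx
    rcases List.mem_append.mp hx with h | h
    · exact ih x h
    · rw [List.mem_singleton] at h
      subst h
      exact mstep_nonneg strs t _ _ ih

theorem arow_nonneg (strs : List String) (t : String) (n k : Nat) {a : Int} (h0 : 0 ≤ a) :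
    ∀ x ∈ arow strs t n k a, 0 ≤ x := by
  intro x hx
  unfold arow at hx
  rcases List.mem_append.mp hx with h | h
  · exact mtab_nonneg strs t k x h
  · rcases List.mem_cons.mp h with rfl | h
    · exact h0
    · rw [List.eq_of_mem_replicate h]; omega

theorem arow_set (strs : List String) (t : String) (n k : Nat) (a v : Int) :
    PySem.List.pySetD (arow strs t n k a) ((k : Int) + 1) v = arow strs t n k v := by
  rw [show ((k : Int) + 1) = ((k + 1 : Nat) : Int) by push_cast; ring, PySem.List.pySetD_natCast]
  unfold arow
  rw [List.set_append]
  rw [mtab_length]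
  simp

theorem A_shape (strs : List String) (t : String) (n k : Nat) (a : Int) (j : Int) :
    Abody strs t ((k : Int) + 1) (arow strs t n k a) j = arow strs t n k (astep strs t n k a j) := by
  unfold Abody astep
  by_cases hc : PySem.Str.slice t (some (if ((k : Int) + 1) - j > 0 then ((k : Int) + 1) - j else 0))
      (some ((k : Int) + 1)) ∈ strs
  · rw [if_pos hc, if_pos hc, arow_set]
  · rw [if_neg hc, if_neg hc]

theorem A_shape_fold (strs : List String) (t : String) (n k : Nat) :
    ∀ (js : List Int) (a : Int),
      js.foldl (Abody strs t ((k : Int) + 1)) (arow strs t n k a) =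
        arow strs t n k (js.foldl (astep strs t n k) a) := by
  intro js
  induction js with
  | nil => intro a; rfl
  | cons j js ih =>
    intro a
    simp only [List.foldl_cons]
    rw [A_shape, ih]

theorem L_A (strs : List String) (t : String) (n k : Nat) :
    ∀ (js : List Nat), (∀ j ∈ js, 1 ≤ j ∧ j ≤ k + 1) → ∀ a : Int,
      (js.map (fun j : Nat => (j : Int))).foldl (astep strs t n k) a = js.foldl (mvstep strs t k) a := by
  intro js
  induction js with
  | nil => intro _ a; rfl
  | cons j js ih =>
    intro hjs a
    obtain ⟨hj1, hjk⟩ := hjs j List.mem_cons_self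
    simp only [List.map_cons, List.foldl_cons]
    rw [show astep strs t n k a ((j : Nat) : Int) = mvstep strs t k a j from ?step]
    · exact ih (fun x hx => hjs x (List.mem_cons_of_mem _ hx)) _
    case step =>
      unfold astep mvstep
      rw [show (if ((k : Int) + 1) - ((j : Nat) : Int) > 0 then ((k : Int) + 1) - ((j : Nat) : Int)
            else 0) = ((k + 1 - j : Nat) : Int) from by split_ifs <;> omega]
      rw [show ((k : Int) + 1) - ((j : Nat) : Int) = ((k + 1 - j : Nat) : Int) from by omega]
      rw [arow_getD_lt strs t n k a (show k + 1 - j ≤ k by omega), arow_getD_self]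
      by_cases hc : piece t (k + 1 - j) (k + 1) ∈ strs
      · rw [if_pos (show PySem.Str.slice t (some ((k + 1 - j : Nat) : Int))
            (some ((k : Int) + 1)) ∈ strs from hc),
          if_pos (show j ≤ k + 1 ∧ piece t (k + 1 - j) (k + 1) ∈ strs from ⟨hjk, hc⟩)]
      · rw [if_neg (show ¬ PySem.Str.slice t (some ((k + 1 - j : Nat) : Int))
            (some ((k : Int) + 1)) ∈ strs from hc),
          if_neg (fun h => hc h.2)]

theorem L_B (strs : List String) (t : String) (n k : Nat) :
    ∀ (js : List Int), (∀ j ∈ js, ((k : Int) + 1) < j) → ∀ a : Int, 0 ≤ a →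
      (piece t 0 (k + 1) ∈ strs → a ≤ 1) → js.foldl (astep strs t n k) a = a := by
  intro js
  induction js with
  | nil => intro _ a _ _; rfl
  | cons j js ih =>
    intro hjs a h0 h1
    have hjk := hjs j List.mem_cons_self
    simp only [List.foldl_cons]
    have hstep : astep strs t n k a j = a := by
      unfold astep
      rw [if_neg (show ¬ ((k : Int) + 1) - j > 0 by omega)]
      by_cases hc : piece t 0 (k + 1) ∈ strs
      · rw [if_pos (show PySem.Str.slice t (some 0) (some ((k : Int) + 1)) ∈ strs from hc)]
        rw [arow_getD_self]
        have hv : 0 ≤ PySem.List.pyGetD (arow strs t n k a) (((k : Int) + 1) - j) 0 :=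
          pyGetD_nonneg _ _ (arow_nonneg strs t n k h0)
        have := h1 hc
        omega
      · rw [if_neg (show ¬ PySem.Str.slice t (some 0) (some ((k : Int) + 1)) ∈ strs from hc)]
    rw [hstep]
    exact ih (fun x hx => hjs x (List.mem_cons_of_mem _ hx)) a h0 h1

theorem L_B' (strs : List String) (t : String) (k : Nat) :
    ∀ (js : List Nat), (∀ j ∈ js, k + 1 < j) → ∀ a : Int, js.foldl (mvstep strs t k) a = a := by
  intro js
  induction js with
  | nil => intro _ a; rfl
  | cons j js ih =>
    intro hjs a
    have := hjs j List.mem_cons_self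
    simp only [List.foldl_cons]
    rw [show mvstep strs t k a j = a from by unfold mvstep; rw [if_neg (by omega)]]
    exact ih (fun x hx => hjs x (List.mem_cons_of_mem _ hx)) a

theorem mv_partial_le (strs : List String) (t : String) (k : Nat) (js : List Nat)
    (hj : (k + 1) ∈ js) (hc : piece t 0 (k + 1) ∈ strs) (a : Int) :
    js.foldl (mvstep strs t k) a ≤ 1 := by
  unfold mvstep
  have := foldMin_le_cand js
      (fun j => j ≤ k + 1 ∧ piece t (k + 1 - j) (k + 1) ∈ strs)
      (fun j => Mv strs t (k + 1 - j) + 1) a hj ⟨le_refl _, by rw [Nat.sub_self]; exact hc⟩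
  have h2 : (fun j => Mv strs t (k + 1 - j) + 1) (k + 1) = 1 := by
    show Mv strs t (k + 1 - (k + 1)) + 1 = 1
    rw [Nat.sub_self, Mv_zero]
    decide
  exact le_of_le_of_eq this h2

theorem mv_partial_nonneg (strs : List String) (t : String) (k : Nat) (js : List Nat) (a : Int)
    (h0 : 0 ≤ a) : 0 ≤ js.foldl (mvstep strs t k) a := by
  unfold mvstep
  rcases foldMin_cases js
      (fun j => j ≤ k + 1 ∧ piece t (k + 1 - j) (k + 1) ∈ strs)
      (fun j => Mv strs t (k + 1 - j) + 1) a with h | ⟨j, _, _, h⟩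
  · rw [h]; exact h0
  · rw [h]
    have := Mv_nonneg strs t (k + 1 - j)
    omega

theorem scalar_split (strs : List String) (t : String) (n k : Nat)
    (frontN backN : List Nat) (backI : List Int)
    (h1 : ([1, 2, 3, 4, 5] : List Int) = frontN.map (fun j : Nat => (j : Int)) ++ backI)
    (h2 : ([1, 2, 3, 4, 5] : List Nat) = frontN ++ backN)
    (hf : ∀ j ∈ frontN, 1 ≤ j ∧ j ≤ k + 1) (hmemf : (k + 1) ∈ frontN)
    (hb : ∀ j ∈ backI, ((k : Int) + 1) < j) (hbN : ∀ j ∈ backN, k + 1 < j) :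
    ([1, 2, 3, 4, 5] : List Int).foldl (astep strs t n k) 987654321 =
      ([1, 2, 3, 4, 5] : List Nat).foldl (mvstep strs t k) 987654321 := by
  rw [h1, h2, List.foldl_append, List.foldl_append, L_A strs t n k frontN hf]
  rw [L_B strs t n k backI hb _ (mv_partial_nonneg strs t k frontN _ (by omega))
      (fun hc => mv_partial_le strs t k frontN hmemf hc _)]
  rw [L_B' strs t k backN hbN]

theorem scalar_main (strs : List String) (t : String) (n k : Nat) :
    ([1, 2, 3, 4, 5] : List Int).foldl (astep strs t n k) 987654321 = Mv strs t (k + 1) := by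
  rw [Mv_succ]
  by_cases h5 : 5 ≤ k + 1
  · rw [show ([1, 2, 3, 4, 5] : List Int) = (([1, 2, 3, 4, 5] : List Nat).map (fun j : Nat => (j : Int)))
      from by decide]
    exact L_A strs t n k [1, 2, 3, 4, 5] (by intro j hj; have := of_mem15 hj; omega) _
  · have hk : k ≤ 3 := by omega
    interval_cases k
    · exact scalar_split strs t n 0 [1] [2, 3, 4, 5] [2, 3, 4, 5] (by decide) (by decide)
        (by intro j hj; simp at hj; omega) (by simp)
        (by intro j hj; simp at hj; omega) (by intro j hj; simp at hj; omega)
    · exact scalar_split strs t n 1 [1, 2] [3, 4, 5] [3, 4, 5] (by decide) (by decide)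
        (by intro j hj; simp at hj; omega) (by simp)
        (by intro j hj; simp at hj; omega) (by intro j hj; simp at hj; omega)
    · exact scalar_split strs t n 2 [1, 2, 3] [4, 5] [4, 5] (by decide) (by decide)
        (by intro j hj; simp at hj; omega) (by simp)
        (by intro j hj; simp at hj; omega) (by intro j hj; simp at hj; omega)
    · exact scalar_split strs t n 3 [1, 2, 3, 4] [5] [5] (by decide) (by decide)
        (by intro j hj; simp at hj; omega) (by simp)
        (by intro j hj; simp at hj; omega) (by intro j hj; simp at hj; omega)

theorem A_inner (strs : List String) (t : String) (n k : Nat) :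
    AbodyOuter strs t (arow strs t n k 987654321) ((k : Int) + 1) =
      arow strs t n k (Mv strs t (k + 1)) := by
  unfold AbodyOuter
  rw [show PySem.List.pyRange 1 6 1 = ([1, 2, 3, 4, 5] : List Int) from by decide]
  rw [A_shape_fold, scalar_main]

theorem A_outer (strs : List String) (t : String) :
    ∀ m, m ≤ t.toList.length →
      (PySem.List.pyRange 1 ((m : Int) + 1) 1).foldl (AbodyOuter strs t)
          ((0 : Int) :: List.replicate t.toList.length 987654321) =
        mtab strs t m ++ List.replicate (t.toList.length - m) 987654321 := by
  intro m
  induction m with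
  | zero =>
    intro _
    rw [PySem.List.pyRange_one_eq_nil (by norm_num)]
    rfl
  | succ m ih =>
    intro hm
    rw [show (((m + 1 : Nat) : Int) + 1) = (((m : Int) + 1) + 1) by push_cast; ring]
    rw [PySem.List.pyRange_one_succ_right (by omega), List.foldl_append]
    rw [ih (by omega)]
    have hrep : List.replicate (t.toList.length - m) (987654321 : Int) =
        987654321 :: List.replicate (t.toList.length - (m + 1)) 987654321 := by
      rw [show t.toList.length - m = (t.toList.length - (m + 1)) + 1 by omega, List.replicate_succ]
    rw [hrep]
    simp only [List.foldl_cons, List.foldl_nil]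
    show AbodyOuter strs t (arow strs t t.toList.length m 987654321) ((m : Int) + 1) = _
    rw [A_inner]
    unfold arow
    rw [show mtab strs t (m + 1) = mtab strs t m ++ [mstep strs t (mtab strs t m) (m + 1)] from rfl,
        ← Mv_succ_mstep]
    simp

theorem dp_init (t : String) :
    PySem.List.pySetD (PySem.List.pyRepeat [(987654321 : Int)] ((t.toList.length : Int) + 1)) 0 0 =
      (0 : Int) :: List.replicate t.toList.length 987654321 := by
  rw [PySem.List.pyRepeat_singleton, show (((t.toList.length : Int)) + 1).toNat = t.toList.length + 1
    by omega]
  rw [List.replicate_succ, show (0 : Int) = ((0 : Nat) : Int) from rfl, PySem.List.pySetD_natCast]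
  rfl

theorem A_final (strs : List String) (t : String) :
    solution strs t = (if Mv strs t t.toList.length < 987654321
      then Mv strs t t.toList.length else -1) := by
  simp only [solution, PySem.Str.len_eq]
  rw [dp_init]
  rw [show ((0 : Int) :: List.replicate t.toList.length (987654321 : Int)).length =
      t.toList.length + 1 from by rw [List.length_cons, List.length_replicate]]
  rw [show ((t.toList.length + 1 : Nat) : Int) = ((t.toList.length : Int) + 1) by push_cast; ring]
  rw [A_outer strs t t.toList.length (le_refl _)]
  rw [Nat.sub_self]
  simp only [List.replicate_zero, List.append_nil]
  rw [PySem.List.pyGetD_natCast]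
  rfl

/-! ### B-side: the forward relaxation preserves the invariant -/

abbrev Bcond (t : String) (m : Nat) (w : String) : Prop :=
  PySem.Str.slice t (some (m : Int)) (some ((m : Int) + PySem.Str.len w)) = w

theorem Bcond_iff (t : String) (m : Nat) (w : String) :
    Bcond t m w ↔ piece t m (m + w.toList.length) = w := by
  unfold Bcond piece
  rw [PySem.Str.len_eq]
  norm_cast

theorem Bcond_le (t : String) {m : Nat} {w : String} (hm : m ≤ t.toList.length)
    (_h1 : 1 ≤ w.toList.length) (hc : Bcond t m w) : m + w.toList.length ≤ t.toList.length := by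
  have h := (Bcond_iff t m w).mp hc
  have h2 := congrArg (fun s => s.toList.length) h
  simp only [toList_piece, List.length_take, List.length_drop, Nat.add_sub_cancel_left] at h2
  have := Nat.min_le_right w.toList.length (t.toList.length - m)
  omega

theorem hwords (strs : List String) {w : String} (hw : w ∈ Bwords strs) :
    w ∈ strs ∧ 1 ≤ w.toList.length ∧ w.toList.length ≤ 5 := by
  unfold Bwords at hw
  rw [PySem.Set.mem_ofList] at hw
  obtain ⟨hmem, hf⟩ := List.mem_filter.mp hw
  simp only [Bool.and_eq_true, decide_eq_true_eq, PySem.Str.len_eq] at hf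
  exact ⟨hmem, by omega, by omega⟩

theorem mem_Bwords (strs : List String) {w : String} (hw : w ∈ strs) (h1 : 1 ≤ w.toList.length)
    (h5 : w.toList.length ≤ 5) : w ∈ Bwords strs := by
  unfold Bwords
  rw [PySem.Set.mem_ofList]
  refine List.mem_filter.mpr ⟨hw, ?_⟩
  simp only [Bool.and_eq_true, decide_eq_true_eq, PySem.Str.len_eq]
  constructor <;> [exact_mod_cast h1; exact_mod_cast h5]

theorem exists_word_iff (strs : List String) (t : String) {m : Nat} (q : Nat)
    (hm : m < t.toList.length) :
    (∃ w ∈ Bwords strs, Bcond t m w ∧ q = m + w.toList.length) ↔ EdgeP strs t m q := by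
  constructor
  · rintro ⟨w, hw, hc, rfl⟩
    obtain ⟨hmem, h1, h5⟩ := hwords strs hw
    refine ⟨by omega, by omega, Bcond_le t (by omega) h1 hc, ?_⟩
    rw [(Bcond_iff t m w).mp hc]
    exact hmem
  · rintro ⟨h1, h5, hn, hmem⟩
    refine ⟨piece t m q, ?_, ?_, ?_⟩
    · have hlw : (piece t m q).toList.length = q - m := by
        simp only [toList_piece, List.length_take, List.length_drop]
        omega
      exact mem_Bwords strs hmem (by omega) (by omega)
    · rw [Bcond_iff]
      have hlw : (piece t m q).toList.length = q - m := by
        simp only [toList_piece, List.length_take, List.length_drop]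
        omega
      rw [hlw, show m + (q - m) = q by omega]
    · have hlw : (piece t m q).toList.length = q - m := by
        simp only [toList_piece, List.length_take, List.length_drop]
        omega
      omega

theorem B_inner (_strs : List String) (t : String) (d : Int) (m : Nat)
    (hm : m ≤ t.toList.length) :
    ∀ (ws : List String) (dp : List Int), (∀ w ∈ ws, 1 ≤ w.toList.length ∧ w.toList.length ≤ 5) →
      dp.length = t.toList.length + 1 →
      ((ws.foldl (Bbody t d (m : Int)) dp).length = t.toList.length + 1 ∧
       ∀ q : Nat, (ws.foldl (Bbody t d (m : Int)) dp).getD q 0 =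
         if (∃ w ∈ ws, Bcond t m w ∧ q = m + w.toList.length) then min (dp.getD q 0) (d + 1)
         else dp.getD q 0) := by
  intro ws
  induction ws with
  | nil =>
    intro dp _ hlen
    refine ⟨hlen, fun q => ?_⟩
    simp
  | cons w ws ih =>
    intro dp hws hlen
    obtain ⟨hw1, hw5⟩ := hws w List.mem_cons_self
    simp only [List.foldl_cons]
    -- effect of the first word
    have hmid : (Bbody t d (m : Int) dp w).length = t.toList.length + 1 ∧
        ∀ q : Nat, (Bbody t d (m : Int) dp w).getD q 0 =
          if (Bcond t m w ∧ q = m + w.toList.length) then min (dp.getD q 0) (d + 1)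
          else dp.getD q 0 := by
      unfold Bbody
      by_cases hc : Bcond t m w
      · have hq0 : m + w.toList.length ≤ t.toList.length := Bcond_le t hm hw1 hc
        have hcast : ((m : Int) + PySem.Str.len w) = ((m + w.toList.length : Nat) : Int) := by
          rw [PySem.Str.len_eq]; push_cast; ring
        have hget : PySem.List.pyGetD dp ((m : Int) + PySem.Str.len w) 0 =
            dp.getD (m + w.toList.length) 0 := by
          rw [hcast, PySem.List.pyGetD_natCast]
        have hset : PySem.List.pySetD dp ((m : Int) + PySem.Str.len w) (d + 1) =
            dp.set (m + w.toList.length) (d + 1) := by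
          rw [hcast, PySem.List.pySetD_natCast]
        rw [if_pos hc, hget, hset]
        by_cases hgt : dp.getD (m + w.toList.length) 0 > d + 1
        · rw [if_pos hgt]
          refine ⟨by rw [List.length_set]; exact hlen, fun q => ?_⟩
          by_cases hq : q = m + w.toList.length
          · subst hq
            rw [if_pos ⟨hc, rfl⟩]
            rw [List.getD_eq_getElem _ 0 (by rw [List.length_set, hlen]; omega),
                List.getElem_set_self]
            omega
          · rw [if_neg (by tauto)]
            rw [List.getD_eq_getElem?_getD, List.getElem?_set_ne (by omega),
                ← List.getD_eq_getElem?_getD]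
        · rw [if_neg hgt]
          refine ⟨hlen, fun q => ?_⟩
          by_cases hq : q = m + w.toList.length
          · subst hq
            rw [if_pos ⟨hc, rfl⟩]
            omega
          · rw [if_neg (by tauto)]
      · rw [if_neg hc]
        refine ⟨hlen, fun q => ?_⟩
        rw [if_neg (by tauto)]
    obtain ⟨hmidlen, hmidgetD⟩ := hmid
    obtain ⟨hreslen, hresgetD⟩ := ih (Bbody t d (m : Int) dp w)
      (fun x hx => hws x (List.mem_cons_of_mem _ hx)) hmidlen
    refine ⟨hreslen, fun q => ?_⟩
    rw [hresgetD q, hmidgetD q]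
    have hcons : (∃ w' ∈ w :: ws, Bcond t m w' ∧ q = m + w'.toList.length) ↔
        ((Bcond t m w ∧ q = m + w.toList.length) ∨
          ∃ w' ∈ ws, Bcond t m w' ∧ q = m + w'.toList.length) := by
      constructor
      · rintro ⟨w', hw', h⟩
        rcases List.mem_cons.mp hw' with rfl | hmem
        · exact Or.inl h
        · exact Or.inr ⟨w', hmem, h⟩
      · rintro (h | ⟨w', hw', h⟩)
        · exact ⟨w, List.mem_cons_self, h⟩
        · exact ⟨w', List.mem_cons_of_mem _ hw', h⟩
    by_cases hcw : Bcond t m w ∧ q = m + w.toList.length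
    · rw [if_pos hcw]
      by_cases hex : ∃ w' ∈ ws, Bcond t m w' ∧ q = m + w'.toList.length
      · rw [if_pos hex, if_pos (hcons.mpr (Or.inl hcw)), min_assoc, min_self]
      · rw [if_neg hex, if_pos (hcons.mpr (Or.inl hcw))]
    · rw [if_neg hcw]
      by_cases hex : ∃ w' ∈ ws, Bcond t m w' ∧ q = m + w'.toList.length
      · rw [if_pos hex, if_pos (hcons.mpr (Or.inr hex))]
      · rw [if_neg hex, if_neg (fun h => (hcons.mp h).elim hcw hex)]

def BInv (strs : List String) (t : String) (m : Nat) (dp : List Int) : Prop :=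
  dp.length = t.toList.length + 1 ∧
  (∀ q, q ≤ m → dp.getD q 0 = Mv strs t q) ∧
  (∀ q, m < q → q ≤ t.toList.length →
    dp.getD q 0 ≤ 987654321 ∧
    (∀ p, p < m → EdgeP strs t p q → dp.getD q 0 ≤ Mv strs t p + 1) ∧
    (dp.getD q 0 = 987654321 ∨ ∃ p, p < m ∧ EdgeP strs t p q ∧ dp.getD q 0 = Mv strs t p + 1))

theorem BInv_zero (strs : List String) (t : String) :
    BInv strs t 0 ((0 : Int) :: List.replicate t.toList.length 987654321) := by
  refine ⟨by simp, ?_, ?_⟩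
  · intro q hq
    interval_cases q
    rfl
  · intro q hq1 hq2
    have : ((0 : Int) :: List.replicate t.toList.length (987654321 : Int)).getD q 0 = 987654321 := by
      obtain ⟨q', rfl⟩ : ∃ q', q = q' + 1 := ⟨q - 1, by omega⟩
      show (List.replicate t.toList.length (987654321 : Int)).getD q' 0 = _
      rw [List.getD_eq_getElem _ 0 (by rw [List.length_replicate]; omega)]
      simp only [List.getElem_replicate]
    rw [this]
    exact ⟨by omega, fun p hp _ => by omega, Or.inl rfl⟩

theorem B_step (strs : List String) (t : String) (m : Nat) (dp : List Int)
    (hm : m < t.toList.length) (h : BInv strs t m dp) :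
    BInv strs t (m + 1) (BbodyOuter strs t dp ((m : Nat) : Int)) := by
  obtain ⟨hlen, hle, hgt⟩ := h
  have hd : PySem.List.pyGetD dp ((m : Nat) : Int) 0 = Mv strs t m := by
    rw [PySem.List.pyGetD_natCast]; exact hle m (le_refl m)
  have hB : BbodyOuter strs t dp ((m : Nat) : Int) =
      (if Mv strs t m = 987654321 then dp
       else (Bwords strs).foldl (Bbody t (Mv strs t m) ((m : Nat) : Int)) dp) := by
    show (if PySem.List.pyGetD dp ((m : Nat) : Int) 0 = 987654321 then dp
      else (Bwords strs).foldl (Bbody t (PySem.List.pyGetD dp ((m : Nat) : Int) 0) ((m : Nat) : Int)) dp) = _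
    rw [hd]
  rw [hB]
  by_cases hINF : Mv strs t m = 987654321
  · rw [if_pos hINF]
    refine ⟨hlen, ?_, ?_⟩
    · intro q hq
      rcases Nat.lt_or_ge q (m + 1) with h' | h'
      · exact hle q (by omega)
      · have hq' : q = m + 1 := by omega
        subst hq'
        obtain ⟨hA1, hA2, hA3⟩ := hgt (m + 1) (by omega) (by omega)
        have hub : Mv strs t (m + 1) ≤ dp.getD (m + 1) 0 := by
          rcases hA3 with h3 | ⟨p, hp, hedge, h3⟩
          · rw [h3]; exact Mv_le_INF strs t (m + 1)
          · rw [h3]; exact edge_E1 strs t hedge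
        have hlb : dp.getD (m + 1) 0 ≤ Mv strs t (m + 1) := by
          rcases edge_E2 strs t (q := m + 1) (by omega) (by omega) with h2 | ⟨p, hedge, h2⟩
          · rw [h2]; exact hA1
          · have hpm : p < m + 1 := hedge.1
            rcases Nat.lt_or_ge p m with hpm' | hpm'
            · rw [h2]; exact hA2 p hpm' hedge
            · have hpm2 : p = m := by omega
              have h5 := Mv_le_INF strs t (m + 1)
              rw [hpm2, hINF] at h2
              omega
        omega
    · intro q hq1 hq2
      obtain ⟨hA1, hA2, hA3⟩ := hgt q (by omega) hq2
      refine ⟨hA1, ?_, ?_⟩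
      · intro p hp hedge
        rcases Nat.lt_or_ge p m with hpm | hpm
        · exact hA2 p hpm hedge
        · have hpm2 : p = m := by omega
          rw [hpm2, hINF]
          omega
      · rcases hA3 with h3 | ⟨p, hp, hedge, h3⟩
        · exact Or.inl h3
        · exact Or.inr ⟨p, by omega, hedge, h3⟩
  · rw [if_neg hINF]
    obtain ⟨hreslen, hresgetD⟩ := B_inner strs t (Mv strs t m) m (by omega) (Bwords strs) dp
      (fun w hw => (hwords strs hw).2) hlen
    refine ⟨hreslen, ?_, ?_⟩
    · intro q hq
      rw [hresgetD q]
      rcases Nat.lt_or_ge q (m + 1) with h' | h'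
      · rw [if_neg ?noedge]
        · exact hle q (by omega)
        case noedge =>
          intro hex
          have := ((exists_word_iff strs t q hm).mp hex).1
          omega
      · have hq' : q = m + 1 := by omega
        subst hq'
        obtain ⟨hA1, hA2, hA3⟩ := hgt (m + 1) (by omega) (by omega)
        have hub : Mv strs t (m + 1) ≤ dp.getD (m + 1) 0 := by
          rcases hA3 with h3 | ⟨p, hp, hedge, h3⟩
          · rw [h3]; exact Mv_le_INF strs t (m + 1)
          · rw [h3]; exact edge_E1 strs t hedge
        by_cases hedge : EdgeP strs t m (m + 1)
        · rw [if_pos ((exists_word_iff strs t (m + 1) hm).mpr hedge)]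
          have h1 : Mv strs t (m + 1) ≤ Mv strs t m + 1 := edge_E1 strs t hedge
          have h2 : Mv strs t (m + 1) ≤ min (dp.getD (m + 1) 0) (Mv strs t m + 1) :=
            le_min hub h1
          have h3 : min (dp.getD (m + 1) 0) (Mv strs t m + 1) ≤ Mv strs t (m + 1) := by
            rcases edge_E2 strs t (q := m + 1) (by omega) (by omega) with h4 | ⟨p, hedge', h4⟩
            · rw [h4]
              exact le_trans (min_le_left _ _) hA1
            · have hpm : p < m + 1 := hedge'.1
              rcases Nat.lt_or_ge p m with hpm' | hpm'
              · rw [h4]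
                exact le_trans (min_le_left _ _) (hA2 p hpm' hedge')
              · have hpm2 : p = m := by omega
                rw [h4, hpm2]
                exact min_le_right _ _
          omega
        · rw [if_neg (fun hex => hedge ((exists_word_iff strs t (m + 1) hm).mp hex))]
          have hlb : dp.getD (m + 1) 0 ≤ Mv strs t (m + 1) := by
            rcases edge_E2 strs t (q := m + 1) (by omega) (by omega) with h2 | ⟨p, hedge', h2⟩
            · rw [h2]; exact hA1
            · have hpm : p < m + 1 := hedge'.1
              rcases Nat.lt_or_ge p m with hpm' | hpm'
              · rw [h2]; exact hA2 p hpm' hedge'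
              · have hpm2 : p = m := by omega
                rw [hpm2] at hedge'
                exact absurd hedge' hedge
          omega
    · intro q hq1 hq2
      rw [hresgetD q]
      obtain ⟨hA1, hA2, hA3⟩ := hgt q (by omega) hq2
      by_cases hedge : EdgeP strs t m q
      · rw [if_pos ((exists_word_iff strs t q hm).mpr hedge)]
        refine ⟨le_trans (min_le_left _ _) hA1, ?_, ?_⟩
        · intro p hp hedge'
          rcases Nat.lt_or_ge p m with hpm | hpm
          · exact le_trans (min_le_left _ _) (hA2 p hpm hedge')
          · have hpm2 : p = m := by omega
            rw [hpm2]
            exact min_le_right _ _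
        · rcases min_choice (dp.getD q 0) (Mv strs t m + 1) with hmin | hmin
          · rw [hmin]
            rcases hA3 with h3 | ⟨p, hp, hedge', h3⟩
            · exact Or.inl h3
            · exact Or.inr ⟨p, by omega, hedge', h3⟩
          · rw [hmin]
            exact Or.inr ⟨m, by omega, hedge, rfl⟩
      · rw [if_neg (fun hex => hedge ((exists_word_iff strs t q hm).mp hex))]
        refine ⟨hA1, ?_, ?_⟩
        · intro p hp hedge'
          rcases Nat.lt_or_ge p m with hpm | hpm
          · exact hA2 p hpm hedge'
          · have hpm2 : p = m := by omega
            rw [hpm2] at hedge'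
            exact absurd hedge' hedge
        · rcases hA3 with h3 | ⟨p, hp, hedge', h3⟩
          · exact Or.inl h3
          · exact Or.inr ⟨p, by omega, hedge', h3⟩

theorem B_outer (strs : List String) (t : String) :
    ∀ m, m ≤ t.toList.length →
      BInv strs t m ((PySem.List.pyRange 0 ((m : Nat) : Int) 1).foldl (BbodyOuter strs t)
        ((0 : Int) :: List.replicate t.toList.length 987654321)) := by
  intro m
  induction m with
  | zero =>
    intro _
    rw [PySem.List.pyRange_one_eq_nil (by norm_num)]
    exact BInv_zero strs t
  | succ m ih =>
    intro hm
    rw [show ((m + 1 : Nat) : Int) = (((m : Nat) : Int) + 1) by push_cast; ring]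
    rw [PySem.List.pyRange_one_succ_right (by omega), List.foldl_append]
    exact B_step strs t m _ (by omega) (ih (by omega))

theorem B_final (strs : List String) (t : String) :
    solution_alt strs t = (if Mv strs t t.toList.length < 987654321
      then Mv strs t t.toList.length else -1) := by
  simp only [solution_alt, PySem.Str.len_eq]
  rw [dp_init]
  obtain ⟨hlen, hle, -⟩ := B_outer strs t t.toList.length (le_refl _)
  rw [PySem.List.pyGetD_natCast, hle t.toList.length (le_refl _)]

-- ===== VERDICT (by name: the statement is the Claim_ definition above) =====
theorem solution_spec : Claim_equal_solution := by
  intro strs t _ _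
  unfold Spec_solution
  rw [A_final, B_final]
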